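-- pv_equiv track=rewrite | github.com/majoporse/uni | ib111/06/06/p2_b_happy.py | is_b_happy
-- ===== SOURCE A (Python) =====
-- def is_b_happy(number: int, base: int) -> bool:
--     numbers = set()
--     while number > 1:
--         count = 0
--         while number > 0:
--             count += (number % base) ** 2
--             number //= base
--         number = count
--         if number == 1:
--             break
--
--         if number in numbers:
--             return False
--
--         numbers.add(number)
--     return True
-- ===== SOURCE B (Python) =====
-- def _digit_square_sum(n, base):
--     s = 0
--     while n > 0:
--         s += (n % base) ** 2
--         n //= base
--     return s
--
--
-- def is_b_happy(number: int, base: int) -> bool: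
--     if number <= 1:
--         return True
--     slow = _digit_square_sum(number, base)
--     fast = _digit_square_sum(slow, base)
--     while fast != 1 and slow != fast:
--         slow = _digit_square_sum(slow, base)
--         fast = _digit_square_sum(_digit_square_sum(fast, base), base)
--     return fast == 1
-- ===== Notes on version B (the rewrite author's own statement) =====
-- stated objective: alternative
-- what changed: Replaces A's grow-a-set-of-seen-values cycle detection with Floyd's tortoise-and-hare: the digit-square-sum step is extracted as a helper and two cursors advance at speeds 1 and 2 through its orbit until the hare reaches 1 or the cursors meet, keeping O(1) state instead of a set.
-- outside the precondition, e.g. on is_b_happy(5, -3): A returns True, B returns False; on is_b_happy(10, -2): A returns True, B returns False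
import Mathlib
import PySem

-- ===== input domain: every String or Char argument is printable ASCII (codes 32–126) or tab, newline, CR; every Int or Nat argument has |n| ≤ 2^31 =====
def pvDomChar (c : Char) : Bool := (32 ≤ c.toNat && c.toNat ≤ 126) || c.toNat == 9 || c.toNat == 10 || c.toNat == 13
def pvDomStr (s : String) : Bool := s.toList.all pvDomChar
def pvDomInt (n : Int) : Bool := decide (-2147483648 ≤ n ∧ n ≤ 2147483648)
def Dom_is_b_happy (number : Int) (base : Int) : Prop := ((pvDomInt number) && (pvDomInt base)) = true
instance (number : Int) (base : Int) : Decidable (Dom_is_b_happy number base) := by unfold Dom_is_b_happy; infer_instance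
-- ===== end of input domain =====

-- B is Floyd's tortoise-and-hare cycle detection on the digit-square-sum orbit (O(1) state)
-- instead of A's set of seen values; equal return values on Pre_ (number ≤ 1 or base ≥ 2).

-- ===== PORT A =====
-- division decrease lemma used by the ports' termination proofs
theorem pv_div_lt {a b : Int} (ha : 0 < a) (hb : 2 ≤ b) : a / b < a := by
  have hdm := Int.ediv_add_emod a b
  have hr0 : 0 ≤ a % b := Int.emod_nonneg a (by omega)
  have hq0 : 0 ≤ a / b := Int.ediv_nonneg (by omega) (by omega)
  nlinarith [mul_le_mul_of_nonneg_right hb hq0]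

-- inner 'while number > 0' loop of A; the '2 ≤ base' conjunct is only a totality guard
-- (inside Pre_ the loop is only reached with 2 ≤ base, where it matches Python exactly)
def pvDigitsA (base : Int) (count : Int) (number : Int) : Int :=
  if h : 0 < number ∧ 2 ≤ base then
    pvDigitsA base (count + (PySem.Int.mod number base) ^ 2) (PySem.Int.floordiv number base)
  else count
termination_by number.toNat
decreasing_by
  rw [PySem.Int.floordiv_eq_ediv_of_pos (by omega)]
  have h2 : number / base < number := pv_div_lt (by omega) (by omega)
  have h3 : 0 ≤ number / base := Int.ediv_nonneg (by omega) (by omega)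
  omega

-- outer 'while number > 1' loop of A; fuel is only a totality guard (proved sufficient under Pre_)
def pvLoopA (base : Int) : Nat → Int → PySem.Set Int → Bool
  | 0, _, _ => true
  | fuel + 1, number, numbers =>
    if 1 < number then
      let number' := pvDigitsA base 0 number
      if number' == 1 then true
      else if PySem.Set.contains numbers number' then false
      else pvLoopA base fuel number' (PySem.Set.add numbers number')
    else true

def is_b_happy (number : Int) (base : Int) : Bool :=
  pvLoopA base ((max number (2 * (base - 1) ^ 2)).toNat + 2) number PySem.Set.empty

-- ===== PORT B =====
-- Source B's _digit_square_sum; the '2 ≤ base' conjunct is only a totality guard (see pvDigitsA)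
def pvDigitsB (s : Int) (n : Int) (base : Int) : Int :=
  if h : 0 < n ∧ 2 ≤ base then
    pvDigitsB (s + (PySem.Int.mod n base) ^ 2) (PySem.Int.floordiv n base) base
  else s
termination_by n.toNat
decreasing_by
  rw [PySem.Int.floordiv_eq_ediv_of_pos (by omega)]
  have h2 : n / base < n := pv_div_lt (by omega) (by omega)
  have h3 : 0 ≤ n / base := Int.ediv_nonneg (by omega) (by omega)
  omega

def pvStep (n : Int) (base : Int) : Int := pvDigitsB 0 n base

-- Source B's 'while fast != 1 and slow != fast' loop; fuel is only a totality guard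
def pvFloyd (base : Int) : Nat → Int → Int → Bool
  | 0, _, fast => fast == 1
  | fuel + 1, slow, fast =>
    if fast ≠ 1 ∧ slow ≠ fast then
      pvFloyd base fuel (pvStep slow base) (pvStep (pvStep fast base) base)
    else fast == 1

def is_b_happy_alt (number : Int) (base : Int) : Bool :=
  if number ≤ 1 then true
  else
    let slow := pvStep number base
    let fast := pvStep slow base
    pvFloyd base ((max number (2 * (base - 1) ^ 2)).toNat + 2) slow fast

-- ===== PRECONDITION & SPEC =====
-- Pre_ restricts to the task's natural domain: when number > 1 the base must be a positional
-- base (2 ≤ base) — for number > 1, A raises ZeroDivisionError at base 0, loops forever at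
-- base 1, and for negative bases its value is an accident of Python's floor semantics for
-- negative divisors, outside the notion of b-happiness.
def Pre_is_b_happy (number : Int) (base : Int) : Prop := number ≤ 1 ∨ 2 ≤ base
instance (number : Int) (base : Int) : Decidable (Pre_is_b_happy number base) := by
  unfold Pre_is_b_happy; infer_instance

def pvWitness_is_b_happy : Int × Int := (7, 10)

def Spec_is_b_happy (number : Int) (base : Int) (out : Bool) : Prop := out = is_b_happy_alt number base
instance (number : Int) (base : Int) (out : Bool) : Decidable (Spec_is_b_happy number base out) := by unfold Spec_is_b_happy; infer_instance

-- ===== CLAIM (what is proved, stated in full; the proofs are below) =====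
def Claim_equal_is_b_happy : Prop := ∀ (number : Int) (base : Int), Dom_is_b_happy number base → Pre_is_b_happy number base → Spec_is_b_happy number base (is_b_happy number base)

-- ===== LEMMAS AND PROOFS =====

theorem pvDigitsA_pos {base number : Int} (c : Int) (h : 0 < number ∧ 2 ≤ base) :
    pvDigitsA base c number
      = pvDigitsA base (c + (PySem.Int.mod number base) ^ 2) (PySem.Int.floordiv number base) := by
  rw [pvDigitsA]; rw [dif_pos h]

theorem pvDigitsA_neg {base number : Int} (c : Int) (h : ¬ (0 < number ∧ 2 ≤ base)) :
    pvDigitsA base c number = c := by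
  rw [pvDigitsA]; rw [dif_neg h]

-- accumulator lemma
theorem pv_acc_aux (base : Int) : ∀ k (n : Int), n.toNat ≤ k → ∀ c,
    pvDigitsA base c n = c + pvDigitsA base 0 n := by
  intro k
  induction k with
  | zero =>
    intro n hn c
    have h : ¬ (0 < n ∧ 2 ≤ base) := by omega
    rw [pvDigitsA_neg c h, pvDigitsA_neg 0 h]; ring
  | succ k ih =>
    intro n hn c
    by_cases h : 0 < n ∧ 2 ≤ base
    · have hb : (0:Int) < base := by omega
      rw [pvDigitsA_pos c h, pvDigitsA_pos 0 h]
      have hm : (PySem.Int.floordiv n base).toNat ≤ k := by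
        rw [PySem.Int.floordiv_eq_ediv_of_pos hb]
        have h2 : n / base < n := pv_div_lt (by omega) (by omega)
        have h3 : 0 ≤ n / base := Int.ediv_nonneg (by omega) (by omega)
        omega
      rw [ih _ hm, ih _ hm (0 + (PySem.Int.mod n base) ^ 2)]
      ring
    · rw [pvDigitsA_neg c h, pvDigitsA_neg 0 h]; ring

theorem pv_acc (base c n : Int) : pvDigitsA base c n = c + pvDigitsA base 0 n :=
  pv_acc_aux base n.toNat n le_rfl c

theorem pvDigitsB_eq_A : ∀ k (n : Int), n.toNat ≤ k → ∀ base s,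
    pvDigitsB s n base = pvDigitsA base s n := by
  intro k
  induction k with
  | zero =>
    intro n hn base s
    have h : ¬ (0 < n ∧ 2 ≤ base) := by omega
    rw [pvDigitsB, dif_neg h, pvDigitsA_neg s h]
  | succ k ih =>
    intro n hn base s
    by_cases h : 0 < n ∧ 2 ≤ base
    · rw [pvDigitsB, dif_pos h, pvDigitsA_pos s h]
      have hm : (PySem.Int.floordiv n base).toNat ≤ k := by
        rw [PySem.Int.floordiv_eq_ediv_of_pos (by omega)]
        have h2 : n / base < n := pv_div_lt (by omega) (by omega)
        have h3 : 0 ≤ n / base := Int.ediv_nonneg (by omega) (by omega)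
        omega
      exact ih _ hm base _
    · rw [pvDigitsB, dif_neg h, pvDigitsA_neg s h]

theorem pvStep_eq (n base : Int) : pvStep n base = pvDigitsA base 0 n :=
  pvDigitsB_eq_A n.toNat n le_rfl base 0

-- unfolding with % and / for 2 ≤ base, 0 < n
theorem pv_g_eq {base n : Int} (hb : 2 ≤ base) (hn : 0 < n) :
    pvDigitsA base 0 n = (n % base) ^ 2 + pvDigitsA base 0 (n / base) := by
  rw [pvDigitsA_pos 0 ⟨hn, hb⟩,
      PySem.Int.mod_eq_emod_of_pos (by omega), PySem.Int.floordiv_eq_ediv_of_pos (by omega),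
      pv_acc]
  ring

theorem pv_g_zero (base : Int) : pvDigitsA base 0 0 = 0 := by
  rw [pvDigitsA_neg 0 (by omega)]

theorem pv_g_small {base n : Int} (hb : 2 ≤ base) (h0 : 0 ≤ n) (h1 : n < base) :
    pvDigitsA base 0 n = n ^ 2 := by
  rcases eq_or_lt_of_le h0 with h | h
  · rw [← h, pv_g_zero]; ring
  · rw [pv_g_eq hb h, Int.emod_eq_of_lt (by omega) h1, Int.ediv_eq_zero_of_lt (by omega) h1,
        pv_g_zero]
    ring

theorem pv_g_nonneg (base : Int) : ∀ k (n : Int), n.toNat ≤ k → 0 ≤ pvDigitsA base 0 n := by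
  intro k
  induction k with
  | zero => intro n hn; rw [pvDigitsA_neg 0 (by omega)]
  | succ k ih =>
    intro n hn
    by_cases h : 0 < n ∧ 2 ≤ base
    · rw [pv_g_eq h.2 h.1]
      have hm : (n / base).toNat ≤ k := by
        have h2 : n / base < n := pv_div_lt (by omega) (by omega)
        have h3 : 0 ≤ n / base := Int.ediv_nonneg (by omega) (by omega)
        omega
      have := ih _ hm
      positivity
    · rw [pvDigitsA_neg 0 h]

theorem pv_g_nonneg' (base n : Int) : 0 ≤ pvDigitsA base 0 n :=
  pv_g_nonneg base n.toNat n le_rfl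

theorem pv_g_pos (base : Int) (hb : 2 ≤ base) : ∀ k (n : Int), n.toNat ≤ k → 0 < n →
    1 ≤ pvDigitsA base 0 n := by
  intro k
  induction k with
  | zero => intro n hn h; omega
  | succ k ih =>
    intro n hn h
    rw [pv_g_eq hb h]
    have hdm := Int.ediv_add_emod n base
    have hr0 : 0 ≤ n % base := Int.emod_nonneg n (by omega)
    have hrb : n % base < base := Int.emod_lt_of_pos n (by omega)
    have hq0 : 0 ≤ n / base := Int.ediv_nonneg (by omega) (by omega)
    have hlt : n / base < n := pv_div_lt (by omega) (by omega)
    by_cases hr : n % base = 0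
    · have hqpos : 0 < n / base := by
        rcases eq_or_lt_of_le hq0 with hq | hq
        · exfalso; rw [← hq] at hdm; omega
        · exact hq
      have := ih (n / base) (by omega) hqpos
      nlinarith [sq_nonneg (n % base)]
    · have h1 : 1 ≤ n % base := by omega
      have := pv_g_nonneg' base (n / base)
      nlinarith

theorem pv_g_one {base : Int} (hb : 2 ≤ base) : pvDigitsA base 0 1 = 1 := by
  rw [pv_g_small hb (by omega) (by omega)]; ring

-- digit-square sum strictly decreases at or above base^2
theorem pv_g_lt (base : Int) (hb : 2 ≤ base) : ∀ k (n : Int), n.toNat ≤ k → base * base ≤ n →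
    pvDigitsA base 0 n < n := by
  intro k
  induction k with
  | zero =>
    intro n hn h
    exfalso
    have h4 : (0:Int) < base * base := mul_pos (by omega) (by omega)
    omega
  | succ k ih =>
    intro n hn h
    have hbb : (0:Int) < base * base := mul_pos (by omega) (by omega)
    have hnpos : 0 < n := by omega
    have hdm := Int.ediv_add_emod n base
    set r := n % base with hrdef
    set m := n / base with hmdef
    have hr0 : 0 ≤ r := Int.emod_nonneg n (by omega)
    have hrb : r < base := Int.emod_lt_of_pos n (by omega)
    have hm0 : 0 ≤ m := Int.ediv_nonneg (by omega) (by omega)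
    have hmlt : m < n := pv_div_lt (by omega) (by omega)
    have hmge : base ≤ m := by
      by_contra hc
      push_neg at hc
      have h5 : base * m ≤ base * (base - 1) := by nlinarith
      nlinarith
    rw [pv_g_eq hb hnpos, ← hrdef, ← hmdef]
    by_cases h2 : base * base ≤ m
    · have ihm := ih m (by omega) h2
      have a6 : (base - 1) * (base - 1) ≤ (base - 1) * m :=
        mul_le_mul_of_nonneg_left (by omega) (by omega)
      have a7 : r * r ≤ (base - 1) * (base - 1) :=
        mul_le_mul (by omega) (by omega) hr0 (by omega)
      have a8 : base * m = (base - 1) * m + m := by ring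
      rw [pow_two]
      linarith
    · -- base ≤ m < base^2 : exactly two more digits
      push_neg at h2
      have hdm2 := Int.ediv_add_emod m base
      set r1 := m % base with hr1def
      set q := m / base with hqdef
      have hr10 : 0 ≤ r1 := Int.emod_nonneg m (by omega)
      have hr1b : r1 < base := Int.emod_lt_of_pos m (by omega)
      have hq0 : 0 ≤ q := Int.ediv_nonneg (by omega) (by omega)
      have hq1 : 1 ≤ q := by
        by_contra hc
        push_neg at hc
        have hq00 : q = 0 := by omega
        rw [hq00] at hdm2
        omega
      have hqb : q < base := by
        by_contra hc
        push_neg at hc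
        have h5 : base * base ≤ base * q := by nlinarith
        nlinarith
      have hgm : pvDigitsA base 0 m = r1 ^ 2 + q ^ 2 := by
        rw [pv_g_eq hb (by omega), ← hr1def, ← hqdef, pv_g_small hb hq0 hqb]
      rw [hgm]
      have hdm3 : n = base * base * q + base * r1 + r := by
        rw [← hdm, ← hdm2]; ring
      have a1 : r * r ≤ r * (base - 1) :=
        mul_le_mul_of_nonneg_left (by omega) hr0
      have a2 : r1 * r1 ≤ r1 * (base - 1) :=
        mul_le_mul_of_nonneg_left (by omega) hr10
      have a3 : q * q ≤ q * (base - 1) :=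
        mul_le_mul_of_nonneg_left (by omega) hq0
      have hf : (0:Int) ≤ base * base - base + 1 := by nlinarith
      have a4 : base * base - base + 1 ≤ q * (base * base - base + 1) :=
        le_mul_of_one_le_left hf hq1
      have a5 : r * (base - 2) ≤ (base - 1) * (base - 2) :=
        mul_le_mul_of_nonneg_right (by omega) (by omega)
      rw [pow_two, pow_two, pow_two]
      nlinarith [a1, a2, a3, a4, a5, hdm3]

theorem pv_g_lt' {base n : Int} (hb : 2 ≤ base) (h : base * base ≤ n) :
    pvDigitsA base 0 n < n :=
  pv_g_lt base hb n.toNat n le_rfl h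

-- digit-square sum stays below max n (2*(base-1)^2)
theorem pv_g_le {base n : Int} (hb : 2 ≤ base) (hn : 1 ≤ n) :
    pvDigitsA base 0 n ≤ max n (2 * (base - 1) ^ 2) := by
  by_cases h : base * base ≤ n
  · exact le_trans (pv_g_lt' hb h).le (le_max_left _ _)
  · push_neg at h
    refine le_trans ?_ (le_max_right _ _)
    have hdm := Int.ediv_add_emod n base
    set r := n % base with hrdef
    set m := n / base with hmdef
    have hr0 : 0 ≤ r := Int.emod_nonneg n (by omega)
    have hrb : r < base := Int.emod_lt_of_pos n (by omega)
    have hm0 : 0 ≤ m := Int.ediv_nonneg (by omega) (by omega)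
    have hmb : m < base := by
      by_contra hc
      push_neg at hc
      have h5 : base * base ≤ base * m := by nlinarith
      omega
    rw [pv_g_eq hb (by omega), ← hrdef, ← hmdef, pv_g_small hb hm0 hmb]
    nlinarith [mul_le_mul_of_nonneg_left hrb.le hr0,
               mul_le_mul_of_nonneg_left hmb.le hm0]

-- ── orbit layer ───────────────────────────────────────────────────────────────

def pvOrb (base n : Int) (k : Nat) : Int := (fun m => pvDigitsA base 0 m)^[k] n

theorem pvOrb_zero (base n : Int) : pvOrb base n 0 = n := rfl

theorem pvOrb_succ (base n : Int) (k : Nat) :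
    pvOrb base n (k + 1) = pvDigitsA base 0 (pvOrb base n k) := by
  unfold pvOrb
  rw [Function.iterate_succ_apply']

theorem pvOrb_add (base n : Int) (d k : Nat) :
    pvOrb base n (d + k) = pvOrb base (pvOrb base n k) d := by
  unfold pvOrb
  rw [Function.iterate_add_apply]

theorem pv_it_pos {base n : Int} (hb : 2 ≤ base) (hn : 1 ≤ n) (k : Nat) :
    1 ≤ pvOrb base n k := by
  induction k with
  | zero => rw [pvOrb_zero]; exact hn
  | succ k ih =>
    rw [pvOrb_succ]
    exact pv_g_pos base hb _ _ le_rfl (by omega)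

theorem pv_it_le {base n : Int} (hb : 2 ≤ base) (hn : 1 ≤ n) (k : Nat) :
    pvOrb base n k ≤ max n (2 * (base - 1) ^ 2) := by
  induction k with
  | zero => rw [pvOrb_zero]; exact le_max_left _ _
  | succ k ih =>
    rw [pvOrb_succ]
    have h1 := pv_g_le hb (pv_it_pos hb hn k)
    exact le_trans h1 (max_le ih (le_max_right _ _))

-- periodicity after a repeat
theorem pv_per {base n : Int} {i j : Nat} (hij : i < j)
    (heq : pvOrb base n i = pvOrb base n j) :
    ∀ c d, pvOrb base n (i + d + c * (j - i)) = pvOrb base n (i + d) := by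
  have key : ∀ d, pvOrb base n (i + d + (j - i)) = pvOrb base n (i + d) := by
    intro d
    have h1 : i + d + (j - i) = d + j := by omega
    have h2 : i + d = d + i := by omega
    rw [h1, h2, pvOrb_add, pvOrb_add, ← heq]
  intro c
  induction c with
  | zero => intro d; simp
  | succ c ih =>
    intro d
    rw [Nat.succ_mul, ← Nat.add_assoc (i + d) (c * (j - i)) (j - i),
        Nat.add_assoc i d (c * (j - i)), key (d + c * (j - i)),
        ← Nat.add_assoc i d (c * (j - i))]
    exact ih d

-- 1 is a fixed point, so reaching 1 is absorbing
theorem pv_one_fix_add {base n : Int} (hb : 2 ≤ base) {m0 : Nat}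
    (h : pvOrb base n m0 = 1) : ∀ d, pvOrb base n (d + m0) = 1 := by
  intro d
  induction d with
  | zero => simpa using h
  | succ d ih =>
    have e : d + 1 + m0 = (d + m0) + 1 := by omega
    rw [e, pvOrb_succ, ih]
    exact pv_g_one hb

theorem pv_one_stable {base n : Int} (hb : 2 ≤ base) {m0 : Nat}
    (h : pvOrb base n m0 = 1) : ∀ k, m0 ≤ k → pvOrb base n k = 1 := by
  intro k hk
  obtain ⟨d, rfl⟩ : ∃ d, k = d + m0 := ⟨k - m0, by omega⟩
  exact pv_one_fix_add hb h d

-- pigeonhole: the orbit cannot have (max n (2*(base-1)^2)).toNat + 2 distinct non-1 values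
theorem pv_pigeon {base n : Int} (hb : 2 ≤ base) (hn : 1 < n) (K : Nat)
    (hK : (max n (2 * (base - 1) ^ 2)).toNat + 2 ≤ K)
    (hne1 : ∀ i, 1 ≤ i → i ≤ K → pvOrb base n i ≠ 1)
    (hinj : ∀ i j, 1 ≤ i → i < j → j ≤ K → pvOrb base n i ≠ pvOrb base n j) : False := by
  have hMn : n ≤ max n (2 * (base - 1) ^ 2) := le_max_left _ _
  have hinj' : Set.InjOn (fun i => pvOrb base n i) (Finset.Icc 1 K) := by
    intro i hi j hj hij
    simp only [Finset.coe_Icc, Set.mem_Icc] at hi hj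
    rcases lt_trichotomy i j with h | h | h
    · exact absurd hij (hinj i j hi.1 h hj.2)
    · exact h
    · exact absurd hij.symm (hinj j i hj.1 h hi.2)
  have hmaps : ∀ i ∈ Finset.Icc 1 K,
      (fun i => pvOrb base n i) i ∈ Finset.Icc 2 (max n (2 * (base - 1) ^ 2)) := by
    intro i hi
    simp only [Finset.mem_Icc] at hi ⊢
    constructor
    · have h1 := pv_it_pos hb (by omega : (1:Int) ≤ n) i
      have h2 := hne1 i hi.1 hi.2
      omega
    · exact pv_it_le hb (by omega) i
  have hcard := Finset.card_le_card_of_injOn _ hmaps hinj'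
  rw [Nat.card_Icc, Int.card_Icc] at hcard
  omega

-- ── A-side loop characterisation ─────────────────────────────────────────────

theorem pv_loopA_true {base n : Int} (hb : 2 ≤ base) (hn : 1 < n)
    (hr : ∃ m, pvOrb base n m = 1) :
    ∀ fuel t (seen : PySem.Set Int),
    (∀ i, 1 ≤ i → i ≤ t → pvOrb base n i ≠ 1) →
    (∀ x, x ∈ seen ↔ ∃ i, 1 ≤ i ∧ i ≤ t ∧ x = pvOrb base n i) →
    pvLoopA base fuel (pvOrb base n t) seen = true := by
  intro fuel
  induction fuel with
  | zero => intro t seen _ _; rfl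
  | succ fuel ih =>
    intro t seen ht0 hmem
    have hcurpos := pv_it_pos hb (by omega : (1:Int) ≤ n) t
    have hcur1 : pvOrb base n t ≠ 1 := by
      cases t with
      | zero => rw [pvOrb_zero]; omega
      | succ t => exact ht0 (t + 1) (by omega) le_rfl
    have hcur : 1 < pvOrb base n t := by omega
    have hnext : pvDigitsA base 0 (pvOrb base n t) = pvOrb base n (t + 1) :=
      (pvOrb_succ base n t).symm
    rw [pvLoopA, if_pos hcur]
    simp only [hnext, beq_iff_eq]
    by_cases h1 : pvOrb base n (t + 1) = 1
    · rw [if_pos h1]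
    · rw [if_neg h1]
      by_cases hin : PySem.Set.contains seen (pvOrb base n (t + 1)) = true
      · exfalso
        have hin' : pvOrb base n (t + 1) ∈ seen := by simpa using hin
        obtain ⟨i, hi1, hit, hival⟩ := (hmem _).mp hin'
        obtain ⟨m, hm⟩ := hr
        have hper := pv_per (show i < t + 1 by omega) hival.symm
        have hmgt : t + 1 ≤ m := by
          by_contra hc
          push_neg at hc
          cases Nat.eq_zero_or_pos m with
          | inl h0 => rw [h0, pvOrb_zero] at hm; omega
          | inr h0 => exact ht0 m h0 (by omega) hm
        obtain ⟨c, d, hd, hcd⟩ :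
            ∃ c d, d < t + 1 - i ∧ m - i = c * (t + 1 - i) + d :=
          ⟨(m - i) / (t + 1 - i), (m - i) % (t + 1 - i),
           Nat.mod_lt _ (by omega), by
             rw [Nat.div_add_mod' (m - i) (t + 1 - i)]⟩
        have hred := hper c d
        have hmid : i + d + c * (t + 1 - i) = m := by omega
        rw [hmid, hm] at hred
        exact ht0 (i + d) (by omega) (by omega) hred.symm
      · rw [if_neg hin]
        refine ih (t + 1) _ ?_ ?_
        · intro i hi1 hit
          rcases Nat.lt_or_ge i (t + 1) with h | h
          · exact ht0 i hi1 (by omega)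
          · have he : i = t + 1 := by omega
            rw [he]; exact h1
        · intro x
          rw [PySem.Set.mem_add, hmem x]
          constructor
          · rintro (⟨i, hi1, hit, hival⟩ | hx)
            · exact ⟨i, hi1, by omega, hival⟩
            · exact ⟨t + 1, by omega, le_rfl, hx⟩
          · rintro ⟨i, hi1, hit, hival⟩
            rcases Nat.lt_or_ge i (t + 1) with h | h
            · exact Or.inl ⟨i, hi1, by omega, hival⟩
            · right; rw [hival]; congr 1; omega

theorem pv_loopA_false {base n : Int} (hb : 2 ≤ base) (hn : 1 < n)
    (hnr : ¬ ∃ m, pvOrb base n m = 1) :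
    ∀ fuel t (seen : PySem.Set Int),
    (∀ x, x ∈ seen ↔ ∃ i, 1 ≤ i ∧ i ≤ t ∧ x = pvOrb base n i) →
    (∀ i j, 1 ≤ i → i < j → j ≤ t → pvOrb base n i ≠ pvOrb base n j) →
    (max n (2 * (base - 1) ^ 2)).toNat + 2 ≤ fuel + t →
    pvLoopA base fuel (pvOrb base n t) seen = false := by
  push_neg at hnr
  intro fuel
  induction fuel with
  | zero =>
    intro t seen hmem hinj hfuel
    exact (pv_pigeon hb hn t (by omega) (fun i hi1 _ => hnr i) hinj).elim
  | succ fuel ih =>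
    intro t seen hmem hinj hfuel
    have hcurpos := pv_it_pos hb (by omega : (1:Int) ≤ n) t
    have hcur1 : pvOrb base n t ≠ 1 := hnr t
    have hcur : 1 < pvOrb base n t := by omega
    have hnext : pvDigitsA base 0 (pvOrb base n t) = pvOrb base n (t + 1) :=
      (pvOrb_succ base n t).symm
    rw [pvLoopA, if_pos hcur]
    simp only [hnext, beq_iff_eq]
    rw [if_neg (hnr (t + 1))]
    by_cases hin : PySem.Set.contains seen (pvOrb base n (t + 1)) = true
    · rw [if_pos hin]
    · rw [if_neg hin]
      refine ih (t + 1) _ ?_ ?_ (by omega)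
      · intro x
        rw [PySem.Set.mem_add, hmem x]
        constructor
        · rintro (⟨i, hi1, hit, hival⟩ | hx)
          · exact ⟨i, hi1, by omega, hival⟩
          · exact ⟨t + 1, by omega, le_rfl, hx⟩
        · rintro ⟨i, hi1, hit, hival⟩
          rcases Nat.lt_or_ge i (t + 1) with h | h
          · exact Or.inl ⟨i, hi1, by omega, hival⟩
          · right; rw [hival]; congr 1; omega
      · intro i j hi1 hij hjt
        rcases Nat.lt_or_ge j (t + 1) with h | h
        · exact hinj i j hi1 hij (by omega)
        · have hj : j = t + 1 := by omega
          intro hc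
          apply hin
          have hmemx : pvOrb base n (t + 1) ∈ seen :=
            (hmem _).mpr ⟨i, hi1, by omega, by rw [← hj]; exact hc.symm⟩
          simpa using hmemx

-- ── B-side (Floyd) characterisation ──────────────────────────────────────────

theorem pv_floyd_step {base n : Int} (k : Nat) :
    pvStep (pvOrb base n k) base = pvOrb base n (k + 1) := by
  rw [pvStep_eq, pvOrb_succ]

theorem pv_floyd_true {base n : Int} (hb : 2 ≤ base) (hn : 1 < n) {m0 : Nat}
    (hm0 : pvOrb base n m0 = 1) :
    ∀ fuel k, m0 ≤ fuel + k →
    pvFloyd base fuel (pvOrb base n (k + 1)) (pvOrb base n (2 * k + 2)) = true := by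
  intro fuel
  induction fuel with
  | zero =>
    intro k hk
    have h1 : pvOrb base n (2 * k + 2) = 1 := pv_one_stable hb hm0 _ (by omega)
    simp only [pvFloyd, h1, beq_self_eq_true]
  | succ fuel ih =>
    intro k hk
    rw [pvFloyd]
    by_cases hfast : pvOrb base n (2 * k + 2) = 1
    · simp [hfast]
    · by_cases hsf : pvOrb base n (k + 1) = pvOrb base n (2 * k + 2)
      · exfalso
        have hper := pv_per (show k + 1 < 2 * k + 2 by omega) hsf
        have hred := hper m0 0
        have e1 : k + 1 + 0 + m0 * (2 * k + 2 - (k + 1)) = k + 1 + m0 * (k + 1) := by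
          have e : 2 * k + 2 - (k + 1) = k + 1 := by omega
          rw [e]
        rw [e1] at hred
        have hone : pvOrb base n (k + 1 + m0 * (k + 1)) = 1 :=
          pv_one_stable hb hm0 _ (by nlinarith)
        rw [hone] at hred
        simp only [Nat.add_zero] at hred
        exact hfast (by rw [← hsf, ← hred])
      · rw [if_pos ⟨hfast, hsf⟩]
        have h1 : pvStep (pvOrb base n (k + 1)) base = pvOrb base n ((k + 1) + 1) :=
          pv_floyd_step (k + 1)
        have h2 : pvStep (pvStep (pvOrb base n (2 * k + 2)) base) base
            = pvOrb base n (2 * (k + 1) + 2) := by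
          rw [pv_floyd_step (2 * k + 2), pv_floyd_step (2 * k + 2 + 1)]
          congr 1
        rw [h1, h2]
        exact ih (k + 1) (by omega)

theorem pv_floyd_false {base n : Int} (hb : 2 ≤ base) (hn : 1 < n)
    (hnr : ¬ ∃ m, pvOrb base n m = 1) :
    ∀ fuel k,
    pvFloyd base fuel (pvOrb base n (k + 1)) (pvOrb base n (2 * k + 2)) = false := by
  push_neg at hnr
  intro fuel
  induction fuel with
  | zero =>
    intro k
    rw [pvFloyd]
    exact beq_eq_false_iff_ne.mpr (hnr (2 * k + 2))
  | succ fuel ih =>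
    intro k
    rw [pvFloyd]
    by_cases hsf : pvOrb base n (k + 1) = pvOrb base n (2 * k + 2)
    · have hcond : ¬(pvOrb base n (2 * k + 2) ≠ 1 ∧
          pvOrb base n (k + 1) ≠ pvOrb base n (2 * k + 2)) := by simp [hsf]
      rw [if_neg hcond]
      exact beq_eq_false_iff_ne.mpr (hnr (2 * k + 2))
    · rw [if_pos ⟨hnr (2 * k + 2), hsf⟩]
      have h1 : pvStep (pvOrb base n (k + 1)) base = pvOrb base n ((k + 1) + 1) :=
        pv_floyd_step (k + 1)
      have h2 : pvStep (pvStep (pvOrb base n (2 * k + 2)) base) base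
          = pvOrb base n (2 * (k + 1) + 2) := by
        rw [pv_floyd_step (2 * k + 2), pv_floyd_step (2 * k + 2 + 1)]
        congr 1
      rw [h1, h2]
      exact ih (k + 1)

-- a reachable 1 is reached within (max n (2*(base-1)^2)).toNat + 2 steps
theorem pv_reach_small {base n : Int} (hb : 2 ≤ base) (hn : 1 < n)
    (hr : ∃ m, pvOrb base n m = 1) :
    ∃ m, pvOrb base n m = 1 ∧ m ≤ (max n (2 * (base - 1) ^ 2)).toNat + 2 := by
  classical
  let m0 := Nat.find hr
  have hm0 : pvOrb base n m0 = 1 := Nat.find_spec hr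
  have hmin : ∀ l, l < m0 → pvOrb base n l ≠ 1 := fun l hl => Nat.find_min hr hl
  by_cases hle : m0 ≤ (max n (2 * (base - 1) ^ 2)).toNat + 2
  · exact ⟨m0, hm0, hle⟩
  · exfalso
    push_neg at hle
    refine pv_pigeon hb hn ((max n (2 * (base - 1) ^ 2)).toNat + 2) le_rfl
      (fun i hi1 hiK => hmin i (by omega)) ?_
    intro i j hi1 hij hjK heq
    have hper := pv_per hij heq
    obtain ⟨c, d, hd, hcd⟩ : ∃ c d, d < j - i ∧ m0 - i = c * (j - i) + d :=
      ⟨(m0 - i) / (j - i), (m0 - i) % (j - i),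
       Nat.mod_lt _ (by omega), by rw [Nat.div_add_mod' (m0 - i) (j - i)]⟩
    have hred := hper c d
    have hmid : i + d + c * (j - i) = m0 := by omega
    rw [hmid, hm0] at hred
    exact hmin (i + d) (by omega) hred.symm

-- ===== VERDICT (by name: the statement is the Claim_ definition above) =====
theorem is_b_happy_spec : Claim_equal_is_b_happy := by
  intro number base _ hpre
  unfold Spec_is_b_happy is_b_happy is_b_happy_alt
  by_cases hn : number ≤ 1
  · rw [if_pos hn]
    rw [show (max number (2 * (base - 1) ^ 2)).toNat + 2
        = ((max number (2 * (base - 1) ^ 2)).toNat + 1) + 1 from rfl]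
    rw [pvLoopA, if_neg (by omega)]
  · have hn1 : 1 < number := by omega
    have hb : 2 ≤ base := by
      rcases hpre with h | h
      · omega
      · exact h
    rw [if_neg hn]
    have hs1 : pvStep number base = pvOrb base number (0 + 1) := by
      rw [pvStep_eq, pvOrb_succ, pvOrb_zero]
    have hs2 : pvStep (pvStep number base) base = pvOrb base number (2 * 0 + 2) := by
      rw [hs1, pv_floyd_step (0 + 1)]
    by_cases hr : ∃ m, pvOrb base number m = 1
    · obtain ⟨m0, hm0, hm0le⟩ := pv_reach_small hb hn1 hr
      have hA := pv_loopA_true hb hn1 hr ((max number (2 * (base - 1) ^ 2)).toNat + 2)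
        0 PySem.Set.empty
        (by intro i hi1 hi0; omega)
        (by intro x; constructor
            · intro hx; exact absurd hx (List.not_mem_nil)
            · rintro ⟨i, hi1, hi0, _⟩; omega)
      have hB := pv_floyd_true hb hn1 hm0 ((max number (2 * (base - 1) ^ 2)).toNat + 2)
        0 (by omega)
      rw [pvOrb_zero] at hA
      rw [hA]
      show true = pvFloyd base ((max number (2 * (base - 1) ^ 2)).toNat + 2)
        (pvStep number base) (pvStep (pvStep number base) base)
      rw [hs2, hs1, hB]
    · have hA := pv_loopA_false hb hn1 hr ((max number (2 * (base - 1) ^ 2)).toNat + 2)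
        0 PySem.Set.empty
        (by intro x; constructor
            · intro hx; exact absurd hx (List.not_mem_nil)
            · rintro ⟨i, hi1, hi0, _⟩; omega)
        (by intro i j hi1 hij hj0; omega)
        (by omega)
      have hB := pv_floyd_false hb hn1 hr ((max number (2 * (base - 1) ^ 2)).toNat + 2) 0
      rw [pvOrb_zero] at hA
      rw [hA]
      show false = pvFloyd base ((max number (2 * (base - 1) ^ 2)).toNat + 2)
        (pvStep number base) (pvStep (pvStep number base) base)
      rw [hs2, hs1, hB]
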